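-- pv_equiv track=rewrite | github.com/jawadsaleem007/FYP-MindPlay | scripts/real_time_classifier.py | parse_picks
-- ===== SOURCE A (Python) =====
-- def parse_picks(picks_arg):
--     if not picks_arg:
--         return None, None
--     parts = [p.strip() for p in picks_arg.split(',') if p.strip()]
--     is_index = all(p.isdigit() for p in parts)
--     if is_index:
--         return [int(p) for p in parts], None
--     return None, parts
-- ===== SOURCE B (Python) =====
-- def parse_picks(picks_arg):
--     # Single streaming character scanner: tokenizes between commas by hand
--     # (no split/strip/isdigit), trimming whitespace via a pending buffer.
--     if not picks_arg:
--         return None, None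
--     indices = []
--     parts = []
--     all_digits = True
--     tok = ""   # current token: left-trimmed, never ends in whitespace
--     pend = ""  # whitespace seen since the last token character
--     for ch in picks_arg + ",":
--         if ch == ",":
--             if tok:
--                 parts.append(tok)
--                 if all("0" <= c <= "9" for c in tok):
--                     indices.append(int(tok))
--                 else:
--                     all_digits = False
--             tok = ""
--             pend = ""
--         elif ch in " \t\n\r\x0b\x0c":
--             if tok:
--                 pend += ch
--         else:
--             tok = tok + pend + ch
--             pend = ""
--     if all_digits:
--         return indices, None
--     return None, parts
-- ===== Notes on version B (the rewrite author's own statement) =====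
-- stated objective: alternative
-- what changed: Replaces A's library pipeline (comma split, per-piece strip, all-isdigit scan, int conversion comprehension) with a hand-written single-pass character scanner that tokenizes between commas and trims whitespace via a pending buffer as it goes.
import Mathlib
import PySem

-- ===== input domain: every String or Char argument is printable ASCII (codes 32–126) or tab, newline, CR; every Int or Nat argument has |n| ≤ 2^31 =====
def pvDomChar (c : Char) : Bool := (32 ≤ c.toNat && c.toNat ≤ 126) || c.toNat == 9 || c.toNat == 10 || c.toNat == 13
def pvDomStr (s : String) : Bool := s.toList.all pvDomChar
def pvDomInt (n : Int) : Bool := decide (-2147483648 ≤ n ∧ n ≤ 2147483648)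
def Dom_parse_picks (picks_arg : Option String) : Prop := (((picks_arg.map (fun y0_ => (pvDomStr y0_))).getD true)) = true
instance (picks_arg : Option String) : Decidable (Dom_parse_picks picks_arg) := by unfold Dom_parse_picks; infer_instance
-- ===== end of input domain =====

-- B replaces A's library pipeline (comma split, per-piece strip, all-isdigit scan, int conversions)
-- by a single hand-written character scanner that tokenizes and trims in one streaming pass.

-- ===== PORT A =====
-- the comprehension [p.strip() for p in picks_arg.split(',') if p.strip()]
def aParts (l : List String) : List String :=
  (l.filter (fun p => PySem.Str.strip p ≠ "")).map PySem.Str.strip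

-- s.split(",") = PySem.Str.split? s "," which is always some (sep ≠ ""); getD [] is unreachable
-- int(p) is applied only to tokens with p.isdigit(), where PySem.Int.ofStr? returns some; getD 0 is unreachable
def parse_picks (picks_arg : Option String) : Option (List Int) × Option (List String) :=
  match picks_arg with
  | none => (none, none)
  | some s =>
    if s = "" then (none, none)
    else
      let parts := aParts ((PySem.Str.split? s ",").getD [])
      let is_index := parts.all PySem.Str.strIsdigit
      if is_index then (some (parts.map (fun p => (PySem.Int.ofStr? p).getD 0)), none)
      else (none, some parts)

-- ===== PORT B =====
-- ch in " \t\n\r\x0b\x0c"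
def bIsWS (c : Char) : Bool :=
  c.toNat = 32 || c.toNat = 9 || c.toNat = 10 || c.toNat = 13 || c.toNat = 11 || c.toNat = 12

-- "0" <= c <= "9"
def bDigit (c : Char) : Bool := '0' ≤ c && c ≤ '9'

-- the for-loop over the characters of picks_arg + ","; state = (indices, parts, all_digits, tok, pend)
def bLoop : List Char → List Int × List String × Bool × List Char × List Char →
    List Int × List String × Bool × List Char × List Char
  | [], st => st
  | ch :: rest, (idxs, parts, ad, tok, pend) =>
    if ch = ',' then
      if tok = [] then bLoop rest (idxs, parts, ad, [], [])
      else if tok.all bDigit then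
        bLoop rest (idxs ++ [(PySem.Int.ofStr? (String.ofList tok)).getD 0],
                    parts ++ [String.ofList tok], ad, [], [])
      else bLoop rest (idxs, parts ++ [String.ofList tok], false, [], [])
    else if bIsWS ch then
      bLoop rest (idxs, parts, ad, tok, if tok = [] then pend else pend ++ [ch])
    else
      bLoop rest (idxs, parts, ad, tok ++ pend ++ [ch], [])

def parse_picks_alt (picks_arg : Option String) : Option (List Int) × Option (List String) :=
  match picks_arg with
  | none => (none, none)
  | some s =>
    if s = "" then (none, none)
    else
      let st := bLoop (s.toList ++ [',']) ([], [], true, [], [])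
      if st.2.2.1 then (some st.1, none) else (none, some st.2.1)

-- ===== PRECONDITION & SPEC =====
def Spec_parse_picks (picks_arg : Option String) (out : Option (List Int) × Option (List String)) : Prop := out = parse_picks_alt picks_arg
instance (picks_arg : Option String) (out : Option (List Int) × Option (List String)) : Decidable (Spec_parse_picks picks_arg out) := by unfold Spec_parse_picks; infer_instance

-- ===== CLAIM (what is proved, stated in full; the proofs are below) =====
def Claim_equal_parse_picks : Prop := ∀ (picks_arg : Option String), Dom_parse_picks picks_arg → Spec_parse_picks picks_arg (parse_picks picks_arg)

-- ===== LEMMAS AND PROOFS =====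

-- proof-only helpers: the token list B's scanner produces, and the per-token finalizer

-- finalization of one token at a ',' (the body of B's "if ch == ','" branch)
def finTok (st : List Int × List String × Bool) (tok : List Char) : List Int × List String × Bool :=
  if tok = [] then st
  else if tok.all bDigit then
    (st.1 ++ [(PySem.Int.ofStr? (String.ofList tok)).getD 0], st.2.1 ++ [String.ofList tok], st.2.2)
  else (st.1, st.2.1 ++ [String.ofList tok], false)

-- the tokens (already trimmed) that B's scanner finalizes, starting from state (tok, pend)
def bToks : List Char → List Char → List Char → List (List Char)
  | [], tok, _ => [tok]
  | c :: r, tok, pend =>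
    if c = ',' then tok :: bToks r [] []
    else if bIsWS c then bToks r tok (if tok = [] then pend else pend ++ [c])
    else bToks r (tok ++ pend ++ [c]) []

-- the trimmed token a single comma-free chunk yields from state (tok, pend)
def chunkTok : List Char → List Char → List Char → List Char
  | tok, _, [] => tok
  | tok, pend, c :: r =>
    if bIsWS c then chunkTok tok (if tok = [] then pend else pend ++ [c]) r
    else chunkTok (tok ++ pend ++ [c]) [] r

-- split on ',' as a structural recursion: (first piece, remaining pieces)
def splitC : List Char → List Char × List (List Char)
  | [] => ([], [])
  | c :: r => if c = ',' then ([], (splitC r).1 :: (splitC r).2) else (c :: (splitC r).1, (splitC r).2)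

-- drop trailing bIsWS characters
def rdropW (l : List Char) : List Char := (l.reverse.dropWhile bIsWS).reverse

theorem bLoop_eq_foldl (cs : List Char) (i : List Int) (p : List String) (a : Bool)
    (tok pend : List Char) :
    bLoop (cs ++ [',']) (i, p, a, tok, pend) =
      (((bToks cs tok pend).foldl finTok (i, p, a)).1,
       ((bToks cs tok pend).foldl finTok (i, p, a)).2.1,
       ((bToks cs tok pend).foldl finTok (i, p, a)).2.2, [], []) := by
  induction cs generalizing i p a tok pend with
  | nil =>
    simp only [List.nil_append, bLoop, bToks, List.foldl, finTok]
    by_cases h0 : tok = []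
    · simp [h0]
    · by_cases hd : tok.all bDigit <;> simp [h0, hd]
  | cons c r ih =>
    simp only [List.cons_append, bLoop, bToks]
    by_cases hc : c = ','
    · simp only [hc, if_true, List.foldl, finTok]
      by_cases h0 : tok = [] <;> by_cases hd : tok.all bDigit <;> simp [h0, hd, ih]
    · by_cases hw : bIsWS c <;> simp [hc, hw, ih]

theorem splitOn_go_comma (fuel : Nat) (l cur : List Char) (acc : List (List Char))
    (h : l.length < fuel) :
    PySem.Chars.splitOn.go [','] fuel l cur acc =
      acc.reverse ++ (cur.reverse ++ (splitC l).1) :: (splitC l).2 := by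
  induction fuel generalizing l cur acc with
  | zero => omega
  | succ n ih =>
    match l with
    | [] => simp [PySem.Chars.splitOn.go, splitC]
    | c :: rest =>
      rw [PySem.Chars.splitOn.go]
      by_cases hc : c = ','
      · have hpre : List.isPrefixOf [','] (c :: rest) = true := by
          simp [List.isPrefixOf, hc]
        rw [if_pos hpre]
        have hdr : List.drop (List.length [',']) (c :: rest) = rest := rfl
        rw [hdr, ih rest [] (cur.reverse :: acc) (by simp at h ⊢; omega)]
        simp [splitC, hc]
      · have hpre : List.isPrefixOf [','] (c :: rest) = false := by
          simp [List.isPrefixOf]; exact fun hh => (hc hh.symm).elim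
        rw [if_neg (by simp [hpre]), ih rest (c :: cur) acc (by simp at h ⊢; omega)]
        simp [splitC, hc]

theorem splitOn_comma (cs : List Char) :
    PySem.Chars.splitOn cs [','] = (splitC cs).1 :: (splitC cs).2 := by
  rw [PySem.Chars.splitOn, splitOn_go_comma (cs.length + 1) cs [] [] (by omega)]
  simp

theorem bToks_eq_map (cs tok pend : List Char) :
    bToks cs tok pend =
      chunkTok tok pend (splitC cs).1 :: ((splitC cs).2.map (chunkTok [] [])) := by
  induction cs generalizing tok pend with
  | nil => simp [bToks, splitC, chunkTok]
  | cons c r ih =>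
    simp only [bToks, splitC]
    by_cases hc : c = ','
    · simp [hc, chunkTok, ih]
    · by_cases hw : bIsWS c
      · simpa [hc, hw, chunkTok] using ih tok (if tok = [] then pend else pend ++ [c])
      · simpa [hc, hw, chunkTok] using ih (tok ++ pend ++ [c]) []

theorem rdropW_cons_nonws (c : Char) (r : List Char) (hc : bIsWS c = false) :
    rdropW (c :: r) = c :: rdropW r := by
  unfold rdropW
  rw [List.reverse_cons, List.dropWhile_append]
  by_cases hE : (r.reverse.dropWhile bIsWS).isEmpty
  · rw [if_pos hE]
    rw [List.isEmpty_iff] at hE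
    simp [List.dropWhile, hc, hE]
  · rw [if_neg (by simp [hE])]
    simp

theorem rdropW_cons_of_ne (x : Char) (t : List Char) (h : rdropW t ≠ []) :
    rdropW (x :: t) = x :: rdropW t := by
  unfold rdropW at h ⊢
  rw [List.reverse_cons, List.dropWhile_append]
  have hne : (t.reverse.dropWhile bIsWS).isEmpty = false := by
    rw [List.isEmpty_eq_false_iff]
    intro hnil; exact h (by rw [hnil]; rfl)
  rw [if_neg (by simp [hne])]
  simp

theorem rdropW_append_cons_nonws (xs : List Char) (c : Char) (r : List Char) (hc : bIsWS c = false) :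
    rdropW (xs ++ c :: r) = xs ++ c :: rdropW r := by
  induction xs with
  | nil => simpa using rdropW_cons_nonws c r hc
  | cons x t ih =>
    rw [List.cons_append, rdropW_cons_of_ne x (t ++ c :: r) (by rw [ih]; simp), ih]
    rfl

theorem rdropW_all_ws (l : List Char) (h : ∀ c ∈ l, bIsWS c = true) : rdropW l = [] := by
  unfold rdropW
  rw [List.dropWhile_eq_nil_iff.mpr (by intro x hx; exact h x (List.mem_reverse.mp hx))]
  rfl

theorem chunkTok_ne_nil (q : List Char) (tok pend : List Char) (h : tok ≠ [])
    (hp : ∀ c ∈ pend, bIsWS c = true) :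
    chunkTok tok pend q = tok ++ rdropW (pend ++ q) := by
  induction q generalizing tok pend with
  | nil =>
    simp only [chunkTok, List.append_nil]
    rw [rdropW_all_ws pend hp, List.append_nil]
  | cons c r ih =>
    simp only [chunkTok]
    by_cases hw : bIsWS c
    · rw [if_pos hw, if_neg h, ih tok (pend ++ [c]) h
        (by intro x hx; rcases List.mem_append.mp hx with hx | hx
            · exact hp x hx
            · simp at hx; subst hx; exact hw)]
      simp
    · rw [if_neg (by simp [hw]), ih (tok ++ pend ++ [c]) [] (by simp) (by simp)]
      rw [show pend ++ c :: r = pend ++ c :: r from rfl,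
          show (c : Char) :: r = [c] ++ r from rfl, ← List.append_assoc]
      rw [show pend ++ [c] ++ r = pend ++ c :: r from by simp]
      rw [rdropW_append_cons_nonws pend c r (by simp [hw])]
      simp

theorem chunkTok_nil (q : List Char) :
    chunkTok [] [] q = rdropW (q.dropWhile bIsWS) := by
  induction q with
  | nil => simp [chunkTok, rdropW]
  | cons c r ih =>
    by_cases hw : bIsWS c
    · simpa [chunkTok, List.dropWhile, hw] using ih
    · rw [show chunkTok [] [] (c :: r) = chunkTok [c] [] r from by simp [chunkTok, hw],
          chunkTok_ne_nil r [c] [] (by simp) (by simp),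
          show List.dropWhile bIsWS (c :: r) = c :: r from by simp [List.dropWhile, hw],
          rdropW_cons_nonws c r (by simp [hw])]
      simp

theorem ws_eq_isspace (c : Char) (h : pvDomChar c = true) :
    bIsWS c = PySem.Chars.isspace c := by
  simp only [pvDomChar, Bool.or_eq_true, Bool.and_eq_true, decide_eq_true_eq, beq_iff_eq] at h
  rw [Bool.eq_iff_iff]
  simp only [bIsWS, PySem.Chars.isspace, Bool.or_eq_true, Bool.and_eq_true, decide_eq_true_eq]
  omega

theorem dropWhile_congr_mem (l : List Char) (p q : Char → Bool)
    (h : ∀ c ∈ l, p c = q c) : l.dropWhile p = l.dropWhile q := by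
  induction l with
  | nil => rfl
  | cons c r ih =>
    simp only [List.dropWhile]
    rw [h c (by simp), ih (fun x hx => h x (by simp [hx]))]

theorem chunkTok_eq_strip (q : List Char) (hd : ∀ c ∈ q, pvDomChar c = true) :
    chunkTok [] [] q = PySem.Chars.strip q := by
  rw [chunkTok_nil, PySem.Chars.strip, PySem.Chars.lstrip, PySem.Chars.rstrip]
  have h1 : q.dropWhile bIsWS = q.dropWhile PySem.Chars.isspace :=
    dropWhile_congr_mem q _ _ (fun c hc => ws_eq_isspace c (hd c hc))
  unfold rdropW
  rw [h1]
  congr 1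
  apply dropWhile_congr_mem
  intro c hc
  exact ws_eq_isspace c (hd c (List.dropWhile_sublist _ |>.subset (List.mem_reverse.mp hc)))

theorem splitC_chars (cs : List Char) :
    (∀ c ∈ (splitC cs).1, c ∈ cs) ∧ ∀ q ∈ (splitC cs).2, ∀ c ∈ q, c ∈ cs := by
  induction cs with
  | nil => simp [splitC]
  | cons x r ih =>
    simp only [splitC]
    by_cases hx : x = ','
    · simp only [hx, if_true]
      constructor
      · simp
      · intro q hq c hc
        rcases List.mem_cons.mp hq with hq | hq
        · exact List.mem_cons_of_mem _ (ih.1 c (hq ▸ hc))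
        · exact List.mem_cons_of_mem _ (ih.2 q hq c hc)
    · simp only [if_neg hx]
      constructor
      · intro c hc
        rcases List.mem_cons.mp hc with hc | hc
        · simp [hc]
        · exact List.mem_cons_of_mem _ (ih.1 c hc)
      · intro q hq c hc
        exact List.mem_cons_of_mem _ (ih.2 q hq c hc)

theorem foldl_finTok_spec (F : List (List Char)) (i : List Int) (p : List String) (a : Bool) :
    (F.foldl finTok (i, p, a)).2.1 = p ++ (F.filter (· ≠ [])).map String.ofList ∧
    (F.foldl finTok (i, p, a)).2.2 = (a && (F.filter (· ≠ [])).all (·.all bDigit)) ∧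
    (F.foldl finTok (i, p, a)).1 =
      i ++ ((F.filter (· ≠ [])).filter (·.all bDigit)).map
            (fun t => (PySem.Int.ofStr? (String.ofList t)).getD 0) := by
  induction F generalizing i p a with
  | nil => simp
  | cons t r ih =>
    simp only [List.foldl, finTok, List.filter_cons]
    by_cases h0 : t = []
    · simp only [h0]
      simpa using ih i p a
    · by_cases hd : t.all bDigit
      · rw [if_neg h0, if_pos hd]
        rcases ih (i ++ [(PySem.Int.ofStr? (String.ofList t)).getD 0]) (p ++ [String.ofList t]) a with ⟨H1, H2, H3⟩
        simp only [PySem.Int.ofStr?, String.toList_ofList] at H1 H2 H3 ⊢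
        refine ⟨?_, ?_, ?_⟩ <;> simp [H1, H2, H3, h0, hd, List.filter_filter]
      · rw [if_neg h0, if_neg (by simp [hd])]
        rcases ih i (p ++ [String.ofList t]) false with ⟨H1, H2, H3⟩
        simp only [PySem.Int.ofStr?, String.toList_ofList] at H1 H2 H3 ⊢
        refine ⟨?_, ?_, ?_⟩ <;> simp [H1, H2, H3, h0, hd, List.filter_filter]

theorem ofList_eq_empty_iff (x : List Char) : String.ofList x = "" ↔ x = [] := by
  constructor
  · intro h; have := congrArg String.toList h; simpa using this
  · intro h; subst h; rfl

theorem strip_ofList (q : List Char) :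
    PySem.Str.strip (String.ofList q) = String.ofList (PySem.Chars.strip q) := by
  apply String.toList_inj.mp
  simp

theorem aParts_ofList (l : List (List Char)) :
    aParts (l.map String.ofList) = ((l.map PySem.Chars.strip).filter (· ≠ [])).map String.ofList := by
  induction l with
  | nil => rfl
  | cons q t ih =>
    by_cases h : PySem.Chars.strip q = []
    · have hc : PySem.Str.strip (String.ofList q) = "" := by rw [strip_ofList, h]
      simpa [aParts, List.filter_cons, hc, h] using ih
    · have hc : PySem.Str.strip (String.ofList q) ≠ "" := by
        rw [strip_ofList, Ne, ofList_eq_empty_iff]; exact h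
      simpa [aParts, List.filter_cons, hc, h, strip_ofList] using ih

theorem all_strIsdigit (F : List (List Char)) (h : ∀ t ∈ F, t ≠ []) :
    (F.map String.ofList).all PySem.Str.strIsdigit = F.all (·.all bDigit) := by
  induction F with
  | nil => rfl
  | cons t r ih =>
    simp only [List.map_cons, List.all_cons]
    rw [ih (fun x hx => h x (List.mem_cons_of_mem _ hx))]
    congr 1
    have ht := h t (by simp)
    have hE : t.isEmpty = false := by simpa [List.isEmpty_eq_false_iff] using ht
    have : PySem.Str.strIsdigit (String.ofList t) = (!t.isEmpty && t.all PySem.Chars.isdigit) := by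
      simp [PySem.Chars.strIsdigit]
    rw [this, hE]
    show t.all PySem.Chars.isdigit = t.all bDigit
    rfl

-- ===== VERDICT (by name: the statement is the Claim_ definition above) =====
theorem parse_picks_spec : Claim_equal_parse_picks := by
  intro pa hdom
  unfold Spec_parse_picks parse_picks parse_picks_alt
  match pa with
  | none => rfl
  | some s =>
    by_cases hs : s = ""
    · simp [hs]
    · simp only [hs, if_false]
      have hdc : ∀ c ∈ s.toList, pvDomChar c = true := by
        simpa [Dom_parse_picks, pvDomStr, List.all_eq_true] using hdom
      have hsplit : (PySem.Str.split? s ",").getD [] =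
          ((splitC s.toList).1 :: (splitC s.toList).2).map String.ofList := by
        simp [PySem.Str.split?, PySem.Chars.split?, splitOn_comma]
      have hsc := splitC_chars s.toList
      have hT : chunkTok [] [] (splitC s.toList).1 :: ((splitC s.toList).2.map (chunkTok [] []))
          = ((splitC s.toList).1 :: (splitC s.toList).2).map PySem.Chars.strip := by
        rw [List.map_cons]
        congr 1
        · exact chunkTok_eq_strip _ (fun c hc => hdc c (hsc.1 c hc))
        · exact List.map_congr_left
            (fun q hq => chunkTok_eq_strip q (fun c hc => hdc c (hsc.2 q hq c hc)))
      rw [bLoop_eq_foldl, bToks_eq_map, hT, hsplit, aParts_ofList]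
      set T := ((splitC s.toList).1 :: (splitC s.toList).2).map PySem.Chars.strip with hTdef
      obtain ⟨B1, B2, B3⟩ := foldl_finTok_spec T [] [] true
      set F := T.filter (· ≠ []) with hF
      have hFne : ∀ t ∈ F, t ≠ [] := by
        intro t ht
        have := (List.mem_filter.mp ht).2
        simpa using this
      rw [all_strIsdigit F hFne]
      by_cases hAll : F.all (·.all bDigit)
      · have hflag : (List.foldl finTok ([], [], true) T).2.2 = true := by
          rw [B2, hAll]; rfl
        have hfd : F.filter (·.all bDigit) = F :=
          List.filter_eq_self.mpr (fun a ha => List.all_eq_true.mp hAll a ha)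
        simp [hAll, hflag, B3, hfd, List.map_map]
      · rw [Bool.not_eq_true] at hAll
        have hflag : (List.foldl finTok ([], [], true) T).2.2 = false := by
          rw [B2, hAll]; rfl
        simp [hAll, hflag, B1]
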